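-- pv_equiv track=rewrite | github.com/AndreaCavis/Python-exercises | unit_3/task1.py | solution
-- ===== SOURCE A (Python) =====
-- def solution(numbers):
--     result = []
--     n = len(numbers)
--
--     # for loop not while because I needed to potentially update each value at a time
--     for i in range(n):
--         current_position = numbers[i]
--
--         if current_position < 0:
--             result.append(-1)
--             continue
--
--         start = i + 1
--         finish = min(start + current_position, n)
--         obstacle = None
--
--         # check if steps from current_position land on obstacle
--         for j in range(start, finish):
--             if numbers[j] < 0:
--                 obstacle = j
--                 break
--         #if they do, obstacle will be the index to replace the numbers[i] with
--         if obstacle is not None: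
--             result.append(obstacle)
--         else:
--             # steps don't land in obstacle, append current value
--             result.append(current_position)
--
--     return result
-- ===== SOURCE B (Python) =====
-- def solution(numbers):
--     n = len(numbers)
--     # nxt[i] = smallest index j >= i with numbers[j] < 0, or None
--     nxt = [None] * (n + 1)
--     for i in range(n - 1, -1, -1):
--         nxt[i] = i if numbers[i] < 0 else nxt[i + 1]
--     out = []
--     for i, x in enumerate(numbers):
--         if x < 0:
--             out.append(-1)
--         else:
--             j = nxt[i + 1]
--             out.append(j if j is not None and j <= i + x else x)
--     return out
-- ===== Notes on version B (the rewrite author's own statement) =====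
-- stated objective: faster
-- what changed: Replaces the per-index forward scan for the first negative in the reach window by a single backward pass precomputing the nearest next-negative index, giving an O(1) lookup per index.
import Mathlib
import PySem

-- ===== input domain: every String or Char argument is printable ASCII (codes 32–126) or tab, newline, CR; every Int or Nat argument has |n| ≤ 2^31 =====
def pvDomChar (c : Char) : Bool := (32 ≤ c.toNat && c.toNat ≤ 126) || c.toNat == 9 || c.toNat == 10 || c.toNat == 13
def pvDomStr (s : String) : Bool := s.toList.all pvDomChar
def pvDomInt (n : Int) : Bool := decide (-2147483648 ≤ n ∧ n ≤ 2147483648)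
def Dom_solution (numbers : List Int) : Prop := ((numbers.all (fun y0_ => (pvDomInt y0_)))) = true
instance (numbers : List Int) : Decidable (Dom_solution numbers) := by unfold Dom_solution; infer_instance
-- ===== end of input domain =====

-- B replaces A's per-index forward scan by a precomputed next-negative array (one backward pass, O(1) per index); return values are proved equal.


-- ===== PORT A =====
-- inner loop 'for j in range(start, finish): if numbers[j] < 0: obstacle = j; break'
-- (j is always in range since finish ≤ n, so getD is exact here)
def scanA (xs : List Int) (j fin : Nat) : Option Nat :=
  if _h : j < fin then
    if xs.getD j 0 < 0 then some j else scanA xs (j + 1) fin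
  else none
termination_by fin - j

-- one outer-loop iteration of A (current < 0 branch, window scan, obstacle/value append)
def stepA (xs : List Int) (i : Nat) : Int :=
  let current := xs.getD i 0
  if current < 0 then -1
  else
    -- current ≥ 0 here, so Python's 'min(start + current, n)' is the Nat 'min (i+1+current.toNat) n'
    match scanA xs (i + 1) (min (i + 1 + current.toNat) xs.length) with
    | some j => (j : Int)
    | none => current

def solution (numbers : List Int) : List Int :=
  (List.range numbers.length).foldl (fun result i => result ++ [stepA numbers i]) []

-- ===== PORT B =====
-- backward pass: nxt[i] = i if numbers[i] < 0 else nxt[i+1]; built by recursion on the suffix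
def buildNxt : List Int → Nat → List (Option Nat)
  | [], _ => [none]
  | x :: r, i =>
      let t := buildNxt r (i + 1)
      (if x < 0 then some i else t.getD 0 none) :: t

def solution_alt (numbers : List Int) : List Int :=
  let nxt := buildNxt numbers 0
  numbers.zipIdx.map (fun (p : Int × Nat) =>
    if p.1 < 0 then (-1 : Int)
    else
      match nxt.getD (p.2 + 1) none with
      | some j => if (j : Int) ≤ (p.2 : Int) + p.1 then (j : Int) else p.1
      | none => p.1)

-- ===== PRECONDITION & SPEC =====
def Spec_solution (numbers : List Int) (out : List Int) : Prop := out = solution_alt numbers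
instance (numbers : List Int) (out : List Int) : Decidable (Spec_solution numbers out) := by unfold Spec_solution; infer_instance

-- ===== CLAIM (what is proved, stated in full; the proofs are below) =====
def Claim_equal_solution : Prop := ∀ (numbers : List Int), Dom_solution numbers → Spec_solution numbers (solution numbers)

-- ===== LEMMAS AND PROOFS =====

-- first absolute index k ≥ s with a negative value, scanning the suffix ys that starts at index s
def firstNeg : List Int → Nat → Option Nat
  | [], _ => none
  | x :: r, s => if x < 0 then some s else firstNeg r (s + 1)

theorem firstNeg_ge : ∀ (ys : List Int) (s k : Nat), firstNeg ys s = some k → s ≤ k := by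
  intro ys
  induction ys with
  | nil => intro s k h; simp [firstNeg] at h
  | cons x r ih =>
      intro s k h
      simp only [firstNeg] at h
      split at h
      · injection h with h; omega
      · have := ih (s + 1) k h; omega

theorem firstNeg_lt : ∀ (ys : List Int) (s k : Nat), firstNeg ys s = some k → k < s + ys.length := by
  intro ys
  induction ys with
  | nil => intro s k h; simp [firstNeg] at h
  | cons x r ih =>
      intro s k h
      simp only [firstNeg] at h
      split at h
      · injection h with h; simp [List.length_cons]; omega
      · have := ih (s + 1) k h; simp [List.length_cons]; omega

theorem scanA_eq_firstNeg (xs : List Int) (j fin : Nat) (hfin : fin ≤ xs.length) :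
    scanA xs j fin =
      (match firstNeg (xs.drop j) j with
       | some k => if k < fin then some k else none
       | none => none) := by
  fun_induction scanA xs j fin with
  | case1 j hlt hneg =>
      have hjlen : j < xs.length := by omega
      rw [List.drop_eq_getElem_cons hjlen]
      have hx : xs[j] < 0 := by rwa [List.getD_eq_getElem _ _ hjlen] at hneg
      simp [firstNeg, hx, hlt]
  | case2 j hlt hneg ih =>
      have hjlen : j < xs.length := by omega
      rw [List.drop_eq_getElem_cons hjlen]
      have hx : ¬ xs[j] < 0 := by rwa [List.getD_eq_getElem _ _ hjlen] at hneg
      rw [show firstNeg (xs[j] :: List.drop (j+1) xs) j = firstNeg (List.drop (j+1) xs) (j+1) from by simp [firstNeg, hx]]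
      exact ih
  | case3 j hge =>
      cases hk : firstNeg (xs.drop j) j with
      | none => simp
      | some k =>
          have := firstNeg_ge _ _ _ hk
          simp only []
          rw [if_neg (by omega)]

theorem buildNxt_getD (xs : List Int) :
    ∀ (s d : Nat), d ≤ xs.length →
    (buildNxt xs s).getD d none = firstNeg (xs.drop d) (s + d) := by
  induction xs with
  | nil =>
      intro s d hd
      simp at hd
      subst hd
      simp [buildNxt, firstNeg]
  | cons x r ih =>
      intro s d hd
      cases d with
      | zero =>
          simp only [buildNxt, List.drop, firstNeg, Nat.add_zero]
          split
          · simp [List.getD]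
          · simpa using ih (s + 1) 0 (by omega)
      | succ e =>
          simp only [buildNxt]
          have h1 : (((if x < 0 then some s else (buildNxt r (s+1)).getD 0 none) :: buildNxt r (s+1))).getD (e+1) none
              = (buildNxt r (s+1)).getD e none := by simp [List.getD]
          rw [h1, ih (s + 1) e (by simpa using hd)]
          have h2 : (x :: r).drop (e + 1) = r.drop e := by simp
          rw [h2]
          congr 1
          omega

theorem solution_eq_map (xs : List Int) :
    solution xs = (List.range xs.length).map (stepA xs) := by
  unfold solution
  generalize List.range xs.length = l
  induction l using List.reverseRecOn with
  | nil => simp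
  | append_singleton l a ih => simp [ih]

theorem step_pointwise (xs : List Int) (i : Nat) (hi : i < xs.length) :
    stepA xs i =
      (if xs[i] < 0 then (-1 : Int)
       else
         match (buildNxt xs 0).getD (i + 1) none with
         | some j => if (j : Int) ≤ (i : Int) + xs[i] then (j : Int) else xs[i]
         | none => xs[i]) := by
  unfold stepA
  rw [List.getD_eq_getElem _ _ hi]
  generalize xs[i] = v
  by_cases hneg : v < 0
  · simp [hneg]
  · rw [if_neg hneg, if_neg hneg]
    have hle : i + 1 ≤ xs.length := hi
    rw [buildNxt_getD xs 0 (i + 1) hle]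
    rw [scanA_eq_firstNeg xs (i + 1) _ (Nat.min_le_right _ _)]
    have hzero : (0 : Nat) + (i + 1) = i + 1 := by omega
    rw [hzero]
    cases hk : firstNeg (xs.drop (i + 1)) (i + 1) with
    | none => simp
    | some k =>
        have hk1 := firstNeg_ge _ _ _ hk
        have hk2 := firstNeg_lt _ _ _ hk
        rw [List.length_drop] at hk2
        have hklen : k < xs.length := by omega
        have hx : ((v.toNat : Int)) = v := Int.toNat_of_nonneg (le_of_not_gt hneg)
        simp only []
        split
        next j' heq =>
          split_ifs at heq with hc
          injection heq with heq
          subst heq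
          split_ifs with h2
          · rfl
          · exfalso; rw [← hx] at h2; omega
        next heq =>
          split_ifs at heq with hc
          split_ifs with h2
          · exfalso; rw [← hx] at h2; omega
          · rfl

theorem solution_eq_alt (xs : List Int) : solution xs = solution_alt xs := by
  rw [solution_eq_map]
  show _ = (buildNxt xs 0 |> fun nxt => xs.zipIdx.map (fun (p : Int × Nat) =>
    if p.1 < 0 then (-1 : Int)
    else
      match nxt.getD (p.2 + 1) none with
      | some j => if (j : Int) ≤ (p.2 : Int) + p.1 then (j : Int) else p.1
      | none => p.1))
  apply List.ext_getElem
  · simp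
  · intro i h1 h2
    have hi : i < xs.length := by simpa using h1
    simp only [List.getElem_map, List.getElem_range, List.getElem_zipIdx]
    simpa using step_pointwise xs i hi

-- ===== VERDICT (by name: the statement is the Claim_ definition above) =====
theorem solution_spec : Claim_equal_solution := by
  intro numbers _
  unfold Spec_solution
  exact solution_eq_alt numbers
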